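-- pv_equiv track=rewrite | github.com/diraven/adventofcode | 2018/day07/pt1.py | find_available
-- ===== SOURCE A (Python) =====
-- import string
-- from typing import List, Tuple
--
-- Requirements = List[Tuple[str, str]]
--
-- def find_available(requirements: Requirements, steps_done: List[str]):
--     """
--     Finds what steps are possible to do at the current stage.
--     """
--
--     # A list of all possible available steps.
--     available_steps = [step for step in string.ascii_uppercase]
--
--     # Exclude steps for which requirements are not yet done.
--     for required, requires in requirements:
--         try:
--             if required not in steps_done:
--                 available_steps.remove(requires)
--         except ValueError:
--             pass
--
--     # Exclude steps that were already done.
--     available_steps = [step for step in available_steps if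
--                        step not in steps_done]
--
--     # Sort the results.
--     available_steps = sorted(available_steps)
--
--     return available_steps
-- ===== SOURCE B (Python) =====
-- import string
-- from typing import List, Tuple
--
-- Requirements = List[Tuple[str, str]]
--
-- def find_available(requirements: Requirements, steps_done: List[str]):
--     """
--     Finds what steps are possible to do at the current stage.
--     """
--     # Walk the (already sorted) alphabet; a step is available when it is not
--     # yet done and every requirement pointing at it is satisfied.  The loop
--     # nesting is inverted w.r.t. A: per letter we scan the requirements, so
--     # no blocked collection is built, nothing is mutated, and no sort is needed.
--     return [step for step in string.ascii_uppercase
--             if step not in steps_done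
--             and all(required in steps_done
--                     for required, requires in requirements
--                     if requires == step)]
-- ===== Notes on version B (the rewrite author's own statement) =====
-- stated objective: simpler
-- what changed: Inverts the loop nesting: instead of scanning requirements and mutating an alphabet list with list.remove/try-except then filtering and sorting, B walks the already-sorted alphabet once and decides each letter by a short-circuiting all(...) scan of the requirements; no mutation, no exception handling, no sort call.
import Mathlib
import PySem

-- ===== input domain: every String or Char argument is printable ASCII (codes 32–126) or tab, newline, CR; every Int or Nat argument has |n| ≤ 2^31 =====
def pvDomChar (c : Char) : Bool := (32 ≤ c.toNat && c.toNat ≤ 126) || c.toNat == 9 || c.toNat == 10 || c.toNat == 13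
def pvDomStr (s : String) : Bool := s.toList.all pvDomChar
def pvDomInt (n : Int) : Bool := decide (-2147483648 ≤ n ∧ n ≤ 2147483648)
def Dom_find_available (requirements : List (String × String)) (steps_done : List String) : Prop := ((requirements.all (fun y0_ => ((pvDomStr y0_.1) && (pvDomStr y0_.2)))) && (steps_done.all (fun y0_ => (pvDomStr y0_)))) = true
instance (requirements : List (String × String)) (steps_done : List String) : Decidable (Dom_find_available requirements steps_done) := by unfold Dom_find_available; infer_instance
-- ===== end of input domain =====

-- B inverts the loop nesting: it walks the already-sorted alphabet and decides each letter
-- by an all(...) scan of the requirements — no mutation, no exception handling, no sort (objective: simpler).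
-- ===== PORT A =====
-- string.ascii_uppercase, as the list of one-character strings Python iteration yields
def pvUpper : List String :=
  ["A","B","C","D","E","F","G","H","I","J","K","L","M",
   "N","O","P","Q","R","S","T","U","V","W","X","Y","Z"]

def find_available (requirements : List (String × String)) (steps_done : List String) : List String :=
  PySem.List.sorted
    ((requirements.foldl (fun avail p =>
        if !(steps_done.contains p.1) then
          -- available_steps.remove(requires) with the ValueError caught: remove? = none leaves the list
          match PySem.List.remove? avail p.2 with
          | some l => l
          | none => avail
        else avail) pvUpper).filter (fun s => !(steps_done.contains s)))
    (fun x => x) false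

-- ===== PORT B =====
def find_available_alt (requirements : List (String × String)) (steps_done : List String) : List String :=
  pvUpper.filter (fun step =>
    !(steps_done.contains step) &&
    requirements.all (fun p => !(p.2 == step) || steps_done.contains p.1))

-- ===== PRECONDITION & SPEC =====
def Spec_find_available (requirements : List (String × String)) (steps_done : List String) (out : List String) : Prop := out = find_available_alt requirements steps_done
instance (requirements : List (String × String)) (steps_done : List String) (out : List String) : Decidable (Spec_find_available requirements steps_done out) := by unfold Spec_find_available; infer_instance

-- ===== CLAIM =====
def Claim_equal_find_available : Prop := ∀ (requirements : List (String × String)) (steps_done : List String), Dom_find_available requirements steps_done → Spec_find_available requirements steps_done (find_available requirements steps_done)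

-- ===== LEMMAS AND PROOFS =====

-- the blocked steps as a list, in requirement order
def pvBlockedList (requirements : List (String × String)) (steps_done : List String) : List String :=
  (requirements.filter (fun p => !(steps_done.contains p.1))).map Prod.snd

-- one step of A's loop on a duplicate-free list is a filter
lemma pvStep_eq_filter (l : List String) (x : String) (h : l.Nodup) :
    (match PySem.List.remove? l x with
     | some l' => l'
     | none => l) = l.filter (fun s => s != x) := by
  by_cases hx : x ∈ l
  · rw [PySem.List.remove?_eq_some_erase _ _ hx, h.erase_eq_filter]
  · rw [(PySem.List.remove?_eq_none_iff l x).mpr hx]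
    symm
    apply List.filter_eq_self.mpr
    intro a ha
    simp only [bne_iff_ne, ne_eq]
    exact fun e => hx (e ▸ ha)

-- A's whole loop on a duplicate-free list filters out the blocked steps
lemma pvLoop_eq_filter (requirements : List (String × String)) (steps_done : List String)
    (l : List String) (h : l.Nodup) :
    requirements.foldl (fun avail p =>
      if !(steps_done.contains p.1) then
        match PySem.List.remove? avail p.2 with
        | some l' => l'
        | none => avail
      else avail) l
    = l.filter (fun s => !((pvBlockedList requirements steps_done).contains s)) := by
  induction requirements generalizing l with
  | nil => simp [pvBlockedList]
  | cons p rs ih =>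
    simp only [List.foldl_cons]
    by_cases hd : steps_done.contains p.1
    · have hm : p.1 ∈ steps_done := by simpa using hd
      simp only [hd, Bool.not_true, Bool.false_eq_true, if_false]
      rw [ih l h]
      simp [pvBlockedList, hm]
    · have hd' : (steps_done.contains p.1) = false := by simpa using hd
      simp only [hd', Bool.not_false, if_true]
      have hm : p.1 ∉ steps_done := by simpa using hd
      rw [pvStep_eq_filter l p.2 h, ih _ (h.filter _), List.filter_filter]
      apply List.filter_congr
      intro a _
      simp [pvBlockedList, hm, bne, Bool.and_comm]

lemma pvNodup_upper : pvUpper.Nodup := by decide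

lemma pvSorted_upper : pvUpper.Pairwise (fun a b : String => a ≤ b) := by
  have h : pvUpper.Pairwise (fun a b : String => a.toList < b.toList) := by decide
  exact h.imp (fun hlt => le_of_lt (String.lt_iff_toList_lt.mpr hlt))

-- "not in the blocked list" = B's per-letter all(...) scan
lemma pvBlockedList_cons (p : String × String) (rs : List (String × String))
    (steps_done : List String) :
    pvBlockedList (p :: rs) steps_done
    = if steps_done.contains p.1 then pvBlockedList rs steps_done
      else p.2 :: pvBlockedList rs steps_done := by
  simp only [pvBlockedList, List.filter_cons]
  by_cases hm : p.1 ∈ steps_done <;> simp [hm]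

lemma pvNotBlocked_eq_all (requirements : List (String × String)) (steps_done : List String)
    (a : String) :
    (!((pvBlockedList requirements steps_done).contains a))
    = requirements.all (fun p => !(p.2 == a) || steps_done.contains p.1) := by
  induction requirements with
  | nil => simp [pvBlockedList]
  | cons p rs ih =>
    simp only [List.contains_eq_mem] at ih
    rw [List.all_cons, pvBlockedList_cons]
    by_cases hm : p.1 ∈ steps_done
    · simp only [hm, List.contains_eq_mem, if_true, decide_true, Bool.or_true, Bool.true_and]
      exact ih
    · have hc : steps_done.contains p.1 = false := by simpa using hm
      rw [hc]
      simp only [Bool.false_eq_true, if_false, List.contains_eq_mem, List.mem_cons]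
      by_cases ha : a = p.2
      · simp [ha]
      · simp [ha, Ne.symm ha, ih]

-- ===== VERDICT =====
theorem find_available_spec : Claim_equal_find_available := by
  intro requirements steps_done _
  show find_available requirements steps_done = find_available_alt requirements steps_done
  unfold find_available find_available_alt
  rw [pvLoop_eq_filter requirements steps_done pvUpper pvNodup_upper, List.filter_filter]
  rw [PySem.List.sorted_eq_self_of_pairwise]
  · apply List.filter_congr
    intro a _
    rw [pvNotBlocked_eq_all, Bool.and_comm]
  · exact List.Pairwise.sublist List.filter_sublist pvSorted_upper
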